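-- pv_equiv track=rewrite | github.com/Gyiming/Adaptive-Adversarial-Network | Ptolemy.py | locatevector
-- ===== SOURCE A (Python) =====
-- def cindex(classdic,i):
--     total = 0
--     #pdb.set_trace()
--     for j in range(len(classdic)):
--         if j == i:
--             if j == 0:
--                 return classdic[i]
--             else:
--                 return total
--         else:
--             total += classdic[j]
--
-- def locatevector(vector,class_id,image_id,labels):
--     a = {0:0,1:0,2:0,3:0,4:0,5:0,6:0,7:0,8:0,9:0}
--     b = {0:0,1:0,2:0,3:0,4:0,5:0,6:0,7:0,8:0,9:0}
--     num_img = 0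
--     sp = 0
--     for i in range(len(class_id)):
--         a[class_id[i]] += 1
--
--     vector_attack = []
--
--     #pdb.set_trace()
--     for i in range(len(labels)):
--         if labels[i] == 0:
--             vector_attack.append(vector[b[0]])
--             b[0] = b[0] + 1
--         else:
--             idx = cindex(a,labels[i])+b[labels[i]]
--             vector_attack.append(vector[idx])
--             b[labels[i]] = b[labels[i]] + 1
--
--     return vector_attack
-- ===== SOURCE B (Python) =====
-- def locatevector(vector, class_id, image_id, labels):
--     a = {0: 0, 1: 0, 2: 0, 3: 0, 4: 0, 5: 0, 6: 0, 7: 0, 8: 0, 9: 0}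
--     for c in class_id:
--         a[c] += 1
--     # one pass of prefix sums: offsets[c] = number of class_id entries with class < c
--     offsets = {}
--     run = 0
--     for c in range(10):
--         offsets[c] = run
--         run += a[c]
--     b = {0: 0, 1: 0, 2: 0, 3: 0, 4: 0, 5: 0, 6: 0, 7: 0, 8: 0, 9: 0}
--     out = []
--     for lab in labels:
--         out.append(vector[offsets[lab] + b[lab]])
--         b[lab] += 1
--     return out
-- ===== Notes on version B (the rewrite author's own statement) =====
-- stated objective: simpler
-- what changed: B precomputes all class offsets once by a single prefix-sum pass over classes 0..9 and then places every label with the uniform formula offsets[label]+b[label], eliminating A's cindex helper (a rescan of the count dict per label) and the label==0 special case.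
import Mathlib
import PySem

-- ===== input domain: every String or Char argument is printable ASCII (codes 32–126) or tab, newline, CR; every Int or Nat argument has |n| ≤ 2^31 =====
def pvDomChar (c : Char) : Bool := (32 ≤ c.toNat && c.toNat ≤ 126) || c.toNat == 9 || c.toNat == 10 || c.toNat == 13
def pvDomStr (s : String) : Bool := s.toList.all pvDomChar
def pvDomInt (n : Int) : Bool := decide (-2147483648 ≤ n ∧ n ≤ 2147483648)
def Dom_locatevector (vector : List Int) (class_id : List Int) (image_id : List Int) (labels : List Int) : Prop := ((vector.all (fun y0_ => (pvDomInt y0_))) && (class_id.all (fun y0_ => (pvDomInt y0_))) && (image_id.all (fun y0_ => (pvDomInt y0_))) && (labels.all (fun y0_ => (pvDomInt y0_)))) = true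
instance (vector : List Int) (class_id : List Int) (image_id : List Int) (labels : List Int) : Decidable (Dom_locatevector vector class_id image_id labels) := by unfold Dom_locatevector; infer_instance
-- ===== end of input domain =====

-- B replaces A's per-label rescan of the count dict (cindex) and the label==0 special case by one
-- prefix-sum pass building an offsets dict, then places every label uniformly (objective: simpler).

-- ===== PORT A =====
-- Python cindex falls through returning None when i is not a key 0..len-1; that path is only
-- reached for labels outside 0..9, which Pre_ excludes (A raises there); the port returns 0 then.
def cindexGo (classdic : PySem.Dict Int Int) (i : Int) : List Int → Int → Int
  | [], _ => 0
  | j :: js, total =>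
    if j = i then
      (if j = 0 then classdic.getD i 0 else total)
    else cindexGo classdic i js (total + classdic.getD j 0)

def cindex (classdic : PySem.Dict Int Int) (i : Int) : Int :=
  cindexGo classdic i (PySem.List.pyRange 0 (classdic.size : Int) 1) 0

-- `a[x] += 1` raises KeyError in Python when x ∉ 0..9; Pre_ excludes those inputs
-- (Dict.modify would instead add the key). `vector[idx]` is ported with pyGetD, total
-- under Pre_'s in-range condition.
def locatevector (vector : List Int) (class_id : List Int) (image_id : List Int) (labels : List Int) : List Int :=
  let a0 : PySem.Dict Int Int := PySem.Dict.ofList [(0,0),(1,0),(2,0),(3,0),(4,0),(5,0),(6,0),(7,0),(8,0),(9,0)]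
  let b0 : PySem.Dict Int Int := PySem.Dict.ofList [(0,0),(1,0),(2,0),(3,0),(4,0),(5,0),(6,0),(7,0),(8,0),(9,0)]
  let a := (PySem.List.pyRange 0 (class_id.length : Int) 1).foldl
      (fun d i => d.modify (PySem.List.pyGetD class_id i 0) 0 (· + 1)) a0
  let st := (PySem.List.pyRange 0 (labels.length : Int) 1).foldl
      (fun (st : PySem.Dict Int Int × List Int) i =>
        stepA vector a st (PySem.List.pyGetD labels i 0))
      (b0, [])
  st.2
where
  stepA (vector : List Int) (a : PySem.Dict Int Int)
      (st : PySem.Dict Int Int × List Int) (l : Int) : PySem.Dict Int Int × List Int :=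
    if l = 0 then
      (st.1.insert 0 (st.1.getD 0 0 + 1), st.2 ++ [PySem.List.pyGetD vector (st.1.getD 0 0) 0])
    else
      let idx := cindex a l + st.1.getD l 0
      (st.1.insert l (st.1.getD l 0 + 1), st.2 ++ [PySem.List.pyGetD vector idx 0])

-- ===== PORT B =====
def locatevector_alt (vector : List Int) (class_id : List Int) (image_id : List Int) (labels : List Int) : List Int :=
  let a0 : PySem.Dict Int Int := PySem.Dict.ofList [(0,0),(1,0),(2,0),(3,0),(4,0),(5,0),(6,0),(7,0),(8,0),(9,0)]
  let a := class_id.foldl (fun d c => d.modify c 0 (· + 1)) a0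
  let off := ((PySem.List.pyRange 0 10 1).foldl
      (fun (st : PySem.Dict Int Int × Int) c => (st.1.insert c st.2, st.2 + a.getD c 0))
      (PySem.Dict.empty, 0)).1
  let b0 : PySem.Dict Int Int := PySem.Dict.ofList [(0,0),(1,0),(2,0),(3,0),(4,0),(5,0),(6,0),(7,0),(8,0),(9,0)]
  let st := labels.foldl
      (fun (st : PySem.Dict Int Int × List Int) lab =>
        (st.1.insert lab (st.1.getD lab 0 + 1),
         st.2 ++ [PySem.List.pyGetD vector (off.getD lab 0 + st.1.getD lab 0) 0]))
      (b0, [])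
  st.2

-- ===== PRECONDITION & SPEC =====
-- Exactly the inputs on which Python A returns: every class_id entry and every label lies in
-- 0..9 (otherwise KeyError), and for each used label class c the last accessed position
-- (number of class_id entries below c) + (occurrences of c in labels) stays within vector
-- (otherwise IndexError).
def Pre_locatevector (vector : List Int) (class_id : List Int) (image_id : List Int) (labels : List Int) : Prop :=
  (∀ c ∈ class_id, 0 ≤ c ∧ c ≤ 9) ∧ (∀ l ∈ labels, 0 ≤ l ∧ l ≤ 9) ∧
  (∀ c ∈ ([0,1,2,3,4,5,6,7,8,9] : List Int), labels.count c ≠ 0 →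
     (class_id.countP (fun x => decide (x < c)) : Int) + (labels.count c : Int) ≤ (vector.length : Int))

instance (vector : List Int) (class_id : List Int) (image_id : List Int) (labels : List Int) : Decidable (Pre_locatevector vector class_id image_id labels) := by unfold Pre_locatevector; infer_instance

def pvWitness_locatevector : List Int × List Int × List Int × List Int := ([7, 8], [3, 0], [1], [0, 3])

def Spec_locatevector (vector : List Int) (class_id : List Int) (image_id : List Int) (labels : List Int) (out : List Int) : Prop := out = locatevector_alt vector class_id image_id labels
instance (vector : List Int) (class_id : List Int) (image_id : List Int) (labels : List Int) (out : List Int) : Decidable (Spec_locatevector vector class_id image_id labels out) := by unfold Spec_locatevector; infer_instance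

-- ===== CLAIM (what is proved, stated in full; the proofs are below) =====
def Claim_equal_locatevector : Prop := ∀ (vector : List Int) (class_id : List Int) (image_id : List Int) (labels : List Int), Dom_locatevector vector class_id image_id labels → Pre_locatevector vector class_id image_id labels → Spec_locatevector vector class_id image_id labels (locatevector vector class_id image_id labels)

-- ===== LEMMAS AND PROOFS =====

theorem pv_witness_ok :
    Dom_locatevector pvWitness_locatevector.1 pvWitness_locatevector.2.1 pvWitness_locatevector.2.2.1 pvWitness_locatevector.2.2.2 ∧
    Pre_locatevector pvWitness_locatevector.1 pvWitness_locatevector.2.1 pvWitness_locatevector.2.2.1 pvWitness_locatevector.2.2.2 := by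
  decide

-- adding elements already present leaves a PySem.Set unchanged
theorem set_update_of_mem (xs : List Int) (s : PySem.Set Int)
    (h : ∀ x ∈ xs, x ∈ s) : PySem.Set.update s xs = s := by
  induction xs generalizing s with
  | nil => rfl
  | cons x xs ih =>
      have hx : PySem.Set.add s x = s := by
        simp [PySem.Set.add, PySem.Set.contains, h x (by simp)]
      have : PySem.Set.update s (x :: xs) = PySem.Set.update (PySem.Set.add s x) xs := rfl
      rw [this, hx, ih _ (fun y hy => h y (by simp [hy]))]

def pvA0 : PySem.Dict Int Int := PySem.Dict.ofList [(0,0),(1,0),(2,0),(3,0),(4,0),(5,0),(6,0),(7,0),(8,0),(9,0)]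

theorem size_count_dict (class_id : List Int) (hc : ∀ c ∈ class_id, 0 ≤ c ∧ c ≤ 9) :
    (class_id.foldl (fun d c => d.modify c 0 (· + 1)) pvA0).size = 10 := by
  have hk : (class_id.foldl (fun d c => d.modify c 0 (· + 1)) pvA0).keys
      = PySem.Set.update pvA0.keys class_id := by
    simpa using PySem.Dict.keys_foldl_modify (l := class_id) (d0 := 0)
      (f := fun _ _ => (· + 1)) (d := pvA0)
  have hupd : PySem.Set.update pvA0.keys class_id = pvA0.keys := by
    apply set_update_of_mem
    intro x hx
    have := hc x hx
    have h9 : x = 0 ∨ x = 1 ∨ x = 2 ∨ x = 3 ∨ x = 4 ∨ x = 5 ∨ x = 6 ∨ x = 7 ∨ x = 8 ∨ x = 9 := by omega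
    rcases h9 with h|h|h|h|h|h|h|h|h|h <;> subst h <;> decide
  have hlen : ∀ d : PySem.Dict Int Int, d.size = d.keys.length := by
    intro d; simp [PySem.Dict.size, PySem.Dict.keys]
  rw [hlen, hk, hupd]; decide

-- B's offsets dict, as built in locatevector_alt
def pvOff (a : PySem.Dict Int Int) : PySem.Dict Int Int :=
  ((PySem.List.pyRange 0 10 1).foldl
      (fun (st : PySem.Dict Int Int × Int) c => (st.1.insert c st.2, st.2 + a.getD c 0))
      (PySem.Dict.empty, 0)).1

theorem cindex_eq_off (a : PySem.Dict Int Int) (ha : a.size = 10)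
    (l : Int) (h1 : 1 ≤ l) (h9 : l ≤ 9) :
    cindex a l = (pvOff a).getD l 0 := by
  have hr : PySem.List.pyRange 0 10 1 = [0,1,2,3,4,5,6,7,8,9] := by decide
  unfold cindex
  rw [ha]
  show cindexGo a l (PySem.List.pyRange 0 10 1) 0 = _
  unfold pvOff
  rw [hr]
  interval_cases l <;>
    simp [cindexGo, PySem.Dict.getD_insert]

theorem off_zero (a : PySem.Dict Int Int) : (pvOff a).getD 0 0 = 0 := by
  have hr : PySem.List.pyRange 0 10 1 = [0,1,2,3,4,5,6,7,8,9] := by decide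
  unfold pvOff
  rw [hr]
  simp [PySem.Dict.getD_insert]

-- ===== VERDICT (by name: the statement is the Claim_ definition above) =====
theorem locatevector_spec : Claim_equal_locatevector := by
  intro vector class_id image_id labels _ hpre
  obtain ⟨hc, hl, _⟩ := hpre
  unfold Spec_locatevector locatevector locatevector_alt
  dsimp only
  rw [show PySem.Dict.ofList [(0,0),(1,0),(2,0),(3,0),(4,0),(5,0),(6,0),(7,0),(8,0),(9,0)] = pvA0 from rfl]
  rw [PySem.List.foldl_pyRange_zero_pyGetD' class_id 0
        (fun (d : PySem.Dict Int Int) (c : Int) => d.modify c 0 (· + 1)) pvA0]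
  rw [PySem.List.foldl_pyRange_zero_pyGetD' labels 0
        (fun (st : PySem.Dict Int Int × List Int) (l : Int) => locatevector.stepA vector
          (class_id.foldl (fun d c => d.modify c 0 (· + 1)) pvA0) st l) (pvA0, [])]
  have ha : (class_id.foldl (fun d c => d.modify c 0 (· + 1)) pvA0).size = 10 :=
    size_count_dict class_id hc
  congr 1
  apply PySem.List.foldl_congr_mem
  intro st x hx
  have hx09 := hl x hx
  unfold locatevector.stepA
  by_cases h0 : x = 0
  · subst h0
    have hz := off_zero (class_id.foldl (fun d c => d.modify c 0 (· + 1)) pvA0)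
    simp only [pvOff] at hz
    simp [hz]
  · have := cindex_eq_off _ ha x (by omega) (by omega)
    simp [h0, pvOff] at this ⊢
    rw [this]
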